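-- pv_equiv track=rewrite | github.com/malllabiisc/SGCP | src/helper.py | sort_pairs_by_src_len
-- ===== SOURCE A (Python) =====
-- def sort_pairs_by_src_len(src, tgt, tgt_dep_trees, tgt_pos):
--     orig_idx = range(len(src))
--
--     # Index by which sorting needs to be done
--     sorted_idx = sorted(orig_idx, key=lambda k:len(src[k]), reverse=True)
--     seq_pairs = list(zip(src, tgt, tgt_dep_trees, tgt_pos))
--     seq_pairs = [seq_pairs[i] for i in sorted_idx]
--
--     # For restoring original order
--     orig_idx = sorted(orig_idx, key=lambda k:sorted_idx[k])
--     src, tgt, tgt_dep_trees, tgt_pos = [s[0] for s in seq_pairs], [s[1] for s in seq_pairs], [s[2] for s in seq_pairs], [s[3] for s in seq_pairs]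
--
--     return src, tgt, tgt_dep_trees, tgt_pos, orig_idx
-- ===== SOURCE B (Python) =====
-- def sort_pairs_by_src_len(src, tgt, tgt_dep_trees, tgt_pos):
--     # Sort the enumerated source sequences once (stable, descending length),
--     # then a single pass builds all four reordered lists and scatters the
--     # restore indices into a preallocated table (no second sort, no zip/unzip).
--     order = sorted(enumerate(src), key=lambda p: len(p[1]), reverse=True)
--     n = len(src)
--     orig_idx = [0] * n
--     new_src, new_tgt, new_dep, new_pos = [], [], [], []
--     for k, (i, s) in enumerate(order):
--         orig_idx[i] = k
--         new_src.append(s)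
--         new_tgt.append(tgt[i])
--         new_dep.append(tgt_dep_trees[i])
--         new_pos.append(tgt_pos[i])
--     return new_src, new_tgt, new_dep, new_pos, orig_idx
-- ===== Notes on version B (the rewrite author's own statement) =====
-- stated objective: alternative
-- what changed: B sorts the enumerated (index, sequence) pairs once and then builds all four reordered lists plus the restore indices in a single accumulator pass (inverse-permutation scatter into a preallocated table), instead of A's index sort + zip/unzip gather + a second comparison sort for the restore indices.
import Mathlib
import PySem

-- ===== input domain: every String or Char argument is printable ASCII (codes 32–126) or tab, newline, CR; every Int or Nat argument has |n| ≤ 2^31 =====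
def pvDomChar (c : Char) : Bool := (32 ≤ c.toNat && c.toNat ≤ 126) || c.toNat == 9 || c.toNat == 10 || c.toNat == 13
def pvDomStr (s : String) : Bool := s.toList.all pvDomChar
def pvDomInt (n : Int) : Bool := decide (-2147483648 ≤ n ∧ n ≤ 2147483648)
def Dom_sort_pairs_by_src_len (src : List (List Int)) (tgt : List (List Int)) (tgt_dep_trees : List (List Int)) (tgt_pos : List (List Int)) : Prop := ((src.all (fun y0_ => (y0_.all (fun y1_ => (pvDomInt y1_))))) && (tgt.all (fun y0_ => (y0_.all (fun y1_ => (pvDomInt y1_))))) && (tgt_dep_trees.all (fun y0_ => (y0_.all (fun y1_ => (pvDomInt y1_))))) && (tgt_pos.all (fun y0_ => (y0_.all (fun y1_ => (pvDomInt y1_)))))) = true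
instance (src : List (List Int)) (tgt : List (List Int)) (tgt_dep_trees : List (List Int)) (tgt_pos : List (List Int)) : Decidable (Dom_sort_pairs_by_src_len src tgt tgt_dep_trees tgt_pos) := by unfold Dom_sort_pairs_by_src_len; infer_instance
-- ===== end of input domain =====

-- B (objective: alternative) sorts the enumerated (index, sequence) pairs once and builds all
-- five outputs in a single accumulator pass, scattering the restore indices into a table
-- instead of A's zip/unzip gather and second comparison sort.

-- ===== PORT A =====
-- Literal transliteration of A: sort the index range by descending source length, reorder the
-- zipped 4-tuples by those indices, recover the restore order with a second sort keyed by
-- sorted_idx[k], then unzip.  seq_pairs[i] / sorted_idx[k] are in range on Pre_, so pyGetD's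
-- default is never used.
def sort_pairs_by_src_len (src : List (List Int)) (tgt : List (List Int)) (tgt_dep_trees : List (List Int)) (tgt_pos : List (List Int)) : List (List Int) × List (List Int) × List (List Int) × List (List Int) × List Int :=
  let n : Int := src.length
  let sorted_idx := PySem.List.sorted (PySem.List.pyRange 0 n 1) (fun k => ((PySem.List.pyGetD src k []).length : Int)) true
  let seq_pairs0 := src.zip (tgt.zip (tgt_dep_trees.zip tgt_pos))
  let seq_pairs := sorted_idx.map (fun i => PySem.List.pyGetD seq_pairs0 i ([], [], [], []))
  let orig_idx := PySem.List.sorted (PySem.List.pyRange 0 n 1) (fun k => PySem.List.pyGetD sorted_idx k 0) false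
  (seq_pairs.map (fun s => s.1), seq_pairs.map (fun s => s.2.1),
   seq_pairs.map (fun s => s.2.2.1), seq_pairs.map (fun s => s.2.2.2), orig_idx)

-- ===== PORT B =====
-- Literal transliteration of B: 'order = sorted(enumerate(src), key=lambda p: len(p[1]),
-- reverse=True)', then ONE loop over enumerate(order) that appends to the four output lists
-- and scatters 'orig_idx[i] = k' (i is a nonnegative in-range index, so the assignment is
-- List.set at i.toNat) into the preallocated [0]*n table.
def sort_pairs_by_src_len_alt (src : List (List Int)) (tgt : List (List Int)) (tgt_dep_trees : List (List Int)) (tgt_pos : List (List Int)) : List (List Int) × List (List Int) × List (List Int) × List (List Int) × List Int :=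
  let order := PySem.List.sorted (PySem.List.enumerate src 0) (fun p => ((p.2.length : Int))) true
  let n := src.length
  (PySem.List.enumerate order 0).foldl
    (fun acc q =>
      (acc.1 ++ [q.2.2],
       acc.2.1 ++ [PySem.List.pyGetD tgt q.2.1 []],
       acc.2.2.1 ++ [PySem.List.pyGetD tgt_dep_trees q.2.1 []],
       acc.2.2.2.1 ++ [PySem.List.pyGetD tgt_pos q.2.1 []],
       acc.2.2.2.2.set q.2.1.toNat q.1))
    ([], [], [], [], List.replicate n 0)

-- ===== PRECONDITION & SPEC =====
-- A raises IndexError when len(src) exceeds the length of any of the other three lists (zip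
-- truncates seq_pairs but sorted_idx still indexes up to len(src)); exactly those inputs are excluded.
def Pre_sort_pairs_by_src_len (src : List (List Int)) (tgt : List (List Int)) (tgt_dep_trees : List (List Int)) (tgt_pos : List (List Int)) : Prop :=
  src.length ≤ tgt.length ∧ src.length ≤ tgt_dep_trees.length ∧ src.length ≤ tgt_pos.length
instance (src : List (List Int)) (tgt : List (List Int)) (tgt_dep_trees : List (List Int)) (tgt_pos : List (List Int)) : Decidable (Pre_sort_pairs_by_src_len src tgt tgt_dep_trees tgt_pos) := by unfold Pre_sort_pairs_by_src_len; infer_instance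
def pvWitness_sort_pairs_by_src_len : List (List Int) × List (List Int) × List (List Int) × List (List Int) :=
  ([[1], [2, 3]], [[4], [5]], [[6], [7]], [[8], [9]])
def Spec_sort_pairs_by_src_len (src : List (List Int)) (tgt : List (List Int)) (tgt_dep_trees : List (List Int)) (tgt_pos : List (List Int)) (out : List (List Int) × List (List Int) × List (List Int) × List (List Int) × List Int) : Prop := out = sort_pairs_by_src_len_alt src tgt tgt_dep_trees tgt_pos
instance (src : List (List Int)) (tgt : List (List Int)) (tgt_dep_trees : List (List Int)) (tgt_pos : List (List Int)) (out : List (List Int) × List (List Int) × List (List Int) × List (List Int) × List Int) : Decidable (Spec_sort_pairs_by_src_len src tgt tgt_dep_trees tgt_pos out) := by unfold Spec_sort_pairs_by_src_len; infer_instance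

-- ===== CLAIM (what is proved, stated in full; the proofs are below) =====
def Claim_equal_sort_pairs_by_src_len : Prop := ∀ (src : List (List Int)) (tgt : List (List Int)) (tgt_dep_trees : List (List Int)) (tgt_pos : List (List Int)), Dom_sort_pairs_by_src_len src tgt tgt_dep_trees tgt_pos → Pre_sort_pairs_by_src_len src tgt tgt_dep_trees tgt_pos → Spec_sort_pairs_by_src_len src tgt tgt_dep_trees tgt_pos (sort_pairs_by_src_len src tgt tgt_dep_trees tgt_pos)

-- ===== LEMMAS AND PROOFS =====

-- insertBy commutes with mapping g when the comparison only looks through g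
lemma insertBy_map {α β : Type} (g : α → β) (ba : α → α → Bool) (bb : β → β → Bool)
    (h : ∀ a a', bb (g a) (g a') = ba a a') (x : α) (ys : List α) :
    PySem.List.insertBy bb (g x) (ys.map g) = (PySem.List.insertBy ba x ys).map g := by
  induction ys with
  | nil => simp [PySem.List.insertBy]
  | cons y t ih =>
    simp only [List.map_cons, PySem.List.insertBy, h]
    split <;> simp [ih]

-- the insertion-sort fold commutes with mapping g
lemma foldl_insertBy_map {α β : Type} (g : α → β) (ba : α → α → Bool) (bb : β → β → Bool)
    (h : ∀ a a', bb (g a) (g a') = ba a a') (l : List α) (acc : List α) :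
    (l.map g).foldl (fun acc x => PySem.List.insertBy bb x acc) (acc.map g)
      = (l.foldl (fun acc x => PySem.List.insertBy ba x acc) acc).map g := by
  induction l generalizing acc with
  | nil => rfl
  | cons x t ih =>
    simp only [List.map_cons, List.foldl_cons]
    rw [insertBy_map g ba bb h, ih]

-- stability/naturality: sorting l.map g by kb equals mapping g over l sorted by ka, when kb∘g = ka
lemma sorted_rev_map_natural {α β : Type} (g : α → β) (ka : α → Int) (kb : β → Int)
    (h : ∀ a, kb (g a) = ka a) (l : List α) :
    PySem.List.sorted (l.map g) kb true = (PySem.List.sorted l ka true).map g := by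
  rw [PySem.List.sorted_rev_eq_foldl_insertBy, PySem.List.sorted_rev_eq_foldl_insertBy]
  have := foldl_insertBy_map g
    (fun a a' => decide (ka a' < ka a)) (fun b b' => decide (kb b' < kb b))
    (fun a a' => by simp [h]) l []
  simpa using this

-- the scatter part of B's loop preserves the length of the table
lemma foldl_set_length (l : List (Int × Int)) (acc : List Int) :
    (l.foldl (fun a p => a.set p.2.toNat p.1) acc).length = acc.length := by
  induction l generalizing acc with
  | nil => rfl
  | cons x t ih => simp [List.foldl, ih]

-- what the scatter writes at position j: the enumerate counter of j's (unique) occurrence in P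
lemma scatter_getElem (P : List Int) (s : Int) (acc : List Int)
    (hnd : P.Nodup) (hP : ∀ x ∈ P, 0 ≤ x ∧ x.toNat < acc.length)
    (j : Nat) (hj : j < acc.length) :
    ((PySem.List.enumerate P s).foldl (fun a p => a.set p.2.toNat p.1) acc)[j]'(by
        simpa [foldl_set_length] using hj)
      = match PySem.List.index? P (j : Int) with
        | some k => s + (k : Int)
        | none => acc[j] := by
  induction P generalizing s acc with
  | nil => simp [PySem.List.enumerate, PySem.List.index?]
  | cons x t ih =>
    rw [PySem.List.enumerate_cons]
    simp only [List.foldl_cons]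
    have hx := hP x (by simp)
    by_cases hxj : x = (j : Int)
    · subst hxj
      rw [PySem.List.index?_cons_self]
      have hnotin : (j : Int) ∉ t := (List.nodup_cons.mp hnd).1
      have hrec := ih (s + 1) (acc.set ((j : Int)).toNat s) (List.nodup_cons.mp hnd).2
        (fun y hy => by simpa using hP y (List.mem_cons_of_mem _ hy))
        (by simpa using hj)
      rw [hrec, (PySem.List.index?_eq_none_iff t ((j : Int))).mpr hnotin]
      simp [List.getElem_set_self]
    · rw [PySem.List.index?_cons_of_ne t hxj]
      have hrec := ih (s + 1) (acc.set x.toNat s) (List.nodup_cons.mp hnd).2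
        (fun y hy => by simpa using hP y (List.mem_cons_of_mem _ hy))
        (by simpa using hj)
      rw [hrec]
      have hne : x.toNat ≠ j := by omega
      cases hidx : PySem.List.index? t ((j : Int)) with
      | none => simp [List.getElem_set_ne hne]
      | some k => simp; ring

-- A's second sort (range sorted by k ↦ P[k]) equals the scatter, for any P that is a
-- permutation of range(n): both are the inverse permutation of P.
lemma inverse_sort_eq_scatter (n : Nat) (P : List Int)
    (hperm : P.Perm (PySem.List.pyRange 0 (n : Int) 1)) :
    PySem.List.sorted (PySem.List.pyRange 0 (n : Int) 1) (fun k => PySem.List.pyGetD P k 0) false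
      = (PySem.List.enumerate P 0).foldl (fun a p => a.set p.2.toNat p.1) (List.replicate n 0) := by
  have hlenP : P.length = n := by
    have := hperm.length_eq
    simpa [PySem.List.length_pyRange_one] using this
  have hmemP : ∀ x ∈ P, 0 ≤ x ∧ x < (n : Int) := by
    intro x hx
    have := (hperm.mem_iff).mp hx
    simpa [PySem.List.mem_pyRange_one] using this
  have hnd : P.Nodup := (hperm.nodup_iff).mpr (PySem.List.nodup_pyRange_one 0 (n : Int))
  set r := (PySem.List.enumerate P 0).foldl (fun a p => a.set p.2.toNat p.1)
    (List.replicate n (0 : Int)) with hr_def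
  have hlenr : r.length = n := by
    rw [hr_def, foldl_set_length, List.length_replicate]
  have hr : ∀ (j : Nat) (hj : j < n), ∃ (k : Nat) (hk : k < n),
      r[j]'(by omega) = (k : Int) ∧ P[k]'(by omega) = (j : Int) := by
    intro j hj
    have hjP : (j : Int) ∈ P := by
      rw [hperm.mem_iff, PySem.List.mem_pyRange_one]
      constructor <;> [positivity; exact_mod_cast hj]
    have hsg := scatter_getElem P 0 (List.replicate n (0 : Int)) hnd
      (fun x hx => by
        have := hmemP x hx
        constructor
        · exact this.1
        · simp only [List.length_replicate]; omega)
      j (by simpa using hj)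
    cases hidx : PySem.List.index? P ((j : Int)) with
    | none => exact absurd ((PySem.List.index?_eq_none_iff P _).mp hidx) (by simpa using hjP)
    | some k =>
      obtain ⟨hk, hPk, -⟩ := PySem.List.getElem_of_index?_eq_some hidx
      refine ⟨k, by omega, ?_, hPk⟩
      rw [hidx] at hsg
      simpa using hsg
  have hpw : r.Pairwise (fun a b => PySem.List.pyGetD P a 0 < PySem.List.pyGetD P b 0) := by
    rw [List.pairwise_iff_getElem]
    intro i j hi hj hij
    obtain ⟨ki, hki, hri, hPi⟩ := hr i (by omega)
    obtain ⟨kj, hkj, hrj, hPj⟩ := hr j (by omega)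
    rw [hri, hrj, PySem.List.pyGetD_natCast, PySem.List.pyGetD_natCast,
      List.getD_eq_getElem _ _ (by omega), List.getD_eq_getElem _ _ (by omega), hPi, hPj]
    exact_mod_cast hij
  have hsub : r ⊆ PySem.List.pyRange 0 (n : Int) 1 := by
    intro x hx
    obtain ⟨j, hj, hxj⟩ := List.mem_iff_getElem.mp hx
    obtain ⟨k, hk, hrk, -⟩ := hr j (by omega)
    rw [PySem.List.mem_pyRange_one, ← hxj, hrk]
    constructor <;> [positivity; exact_mod_cast hk]
  have hndr : r.Nodup := hpw.imp (fun {a b} h heq => by subst heq; exact lt_irrefl _ h)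
  have hpermr : r.Perm (PySem.List.pyRange 0 (n : Int) 1) :=
    (hndr.subperm hsub).perm_of_length_le
      (by rw [hlenr, PySem.List.length_pyRange_one]; omega)
  exact PySem.List.sorted_eq_of_perm_of_pairwise_lt _ r _ hpermr hpw

-- under Pre_, the zipped 4-tuple at an in-range index is the 4-tuple of pointwise indexings
lemma zip_component (src tgt tgt_dep_trees tgt_pos : List (List Int))
    (hpre : Pre_sort_pairs_by_src_len src tgt tgt_dep_trees tgt_pos)
    (i : Int) (h0 : 0 ≤ i) (h1 : i < (src.length : Int)) :
    PySem.List.pyGetD (src.zip (tgt.zip (tgt_dep_trees.zip tgt_pos))) i ([], [], [], [])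
      = (PySem.List.pyGetD src i [], PySem.List.pyGetD tgt i [],
         PySem.List.pyGetD tgt_dep_trees i [], PySem.List.pyGetD tgt_pos i []) := by
  obtain ⟨h2, h3, h4⟩ := hpre
  have hi : i.toNat < src.length := by omega
  rw [PySem.List.pyGetD_of_nonneg _ _ h0, PySem.List.pyGetD_of_nonneg _ _ h0,
    PySem.List.pyGetD_of_nonneg _ _ h0, PySem.List.pyGetD_of_nonneg _ _ h0,
    PySem.List.pyGetD_of_nonneg _ _ h0]
  rw [List.getD_eq_getElem _ _ (by simp [List.length_zip]; omega),
    List.getD_eq_getElem _ _ hi, List.getD_eq_getElem _ _ (by omega),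
    List.getD_eq_getElem _ _ (by omega), List.getD_eq_getElem _ _ (by omega)]
  simp [List.getElem_zip]

-- B's single loop over the g-decorated indices splits into the four appends and the scatter
lemma fold_char (src tgt tgt_dep_trees tgt_pos : List (List Int)) (P : List Int)
    (s : Int) (a1 a2 a3 a4 : List (List Int)) (a5 : List Int) :
    (PySem.List.enumerate (P.map (fun i => ((i : Int), PySem.List.pyGetD src i []))) s).foldl
      (fun acc q =>
        (acc.1 ++ [q.2.2],
         acc.2.1 ++ [PySem.List.pyGetD tgt q.2.1 []],
         acc.2.2.1 ++ [PySem.List.pyGetD tgt_dep_trees q.2.1 []],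
         acc.2.2.2.1 ++ [PySem.List.pyGetD tgt_pos q.2.1 []],
         acc.2.2.2.2.set q.2.1.toNat q.1))
      (a1, a2, a3, a4, a5)
    = (a1 ++ P.map (fun i => PySem.List.pyGetD src i []),
       a2 ++ P.map (fun i => PySem.List.pyGetD tgt i []),
       a3 ++ P.map (fun i => PySem.List.pyGetD tgt_dep_trees i []),
       a4 ++ P.map (fun i => PySem.List.pyGetD tgt_pos i []),
       (PySem.List.enumerate P s).foldl (fun a p => a.set p.2.toNat p.1) a5) := by
  induction P generalizing s a1 a2 a3 a4 a5 with
  | nil => simp [PySem.List.enumerate]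
  | cons i t ih =>
    simp only [List.map_cons, PySem.List.enumerate_cons, List.foldl_cons]
    rw [ih]
    simp

-- ===== VERDICT (by name: the statement is the Claim_ definition above) =====
theorem sort_pairs_by_src_len_spec : Claim_equal_sort_pairs_by_src_len := by
  intro src tgt tgt_dep_trees tgt_pos _ hpre
  unfold Spec_sort_pairs_by_src_len sort_pairs_by_src_len sort_pairs_by_src_len_alt
  simp only []
  set P := PySem.List.sorted (PySem.List.pyRange 0 (src.length : Int) 1)
    (fun k => ((PySem.List.pyGetD src k []).length : Int)) true with hP_def
  have hperm : P.Perm (PySem.List.pyRange 0 (src.length : Int) 1) :=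
    PySem.List.sorted_perm _ _ _
  have hmemP : ∀ i ∈ P, 0 ≤ i ∧ i < (src.length : Int) := by
    intro i hi
    have := (hperm.mem_iff).mp hi
    simpa [PySem.List.mem_pyRange_one] using this
  -- B's sorted(enumerate(src)) is P decorated with the source sequences
  have horder : PySem.List.sorted (PySem.List.enumerate src 0)
      (fun p => ((p.2.length : Int))) true
      = P.map (fun i => ((i : Int), PySem.List.pyGetD src i [])) := by
    rw [PySem.List.enumerate_eq_map_pyRange (d := ([] : List Int)),
      sorted_rev_map_natural (fun i => ((i : Int), PySem.List.pyGetD src i []))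
        (fun k => ((PySem.List.pyGetD src k []).length : Int))
        (fun p => ((p.2.length : Int))) (fun a => rfl), hP_def]
    simp [PySem.List.len]
  rw [horder, fold_char]
  have hz : ∀ i ∈ P,
      PySem.List.pyGetD (src.zip (tgt.zip (tgt_dep_trees.zip tgt_pos))) i ([], [], [], [])
        = (PySem.List.pyGetD src i [], PySem.List.pyGetD tgt i [],
           PySem.List.pyGetD tgt_dep_trees i [], PySem.List.pyGetD tgt_pos i []) := by
    intro i hi
    exact zip_component src tgt tgt_dep_trees tgt_pos hpre i (hmemP i hi).1 (hmemP i hi).2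
  refine Prod.ext ?_ (Prod.ext ?_ (Prod.ext ?_ (Prod.ext ?_ ?_))) <;>
    simp only [List.map_map, List.nil_append]
  · exact List.map_congr_left (fun i hi => by simp [Function.comp, hz i hi])
  · exact List.map_congr_left (fun i hi => by simp [Function.comp, hz i hi])
  · exact List.map_congr_left (fun i hi => by simp [Function.comp, hz i hi])
  · exact List.map_congr_left (fun i hi => by simp [Function.comp, hz i hi])
  · exact inverse_sort_eq_scatter src.length P hperm
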